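-- pv_equiv track=rewrite | github.com/PetrPrazak/AdventOfCode | 2022/25/aoc2022_25.py | snafu2int
-- ===== SOURCE A (Python) =====
-- def snafu2int(snafu):
--     total = 0
--     radix = 1
--     for c in reversed(snafu):
--         i = -2 if c == "=" else -1 if c == "-" else int(c)
--         total += i * radix
--         radix *= 5
--     return total
-- ===== SOURCE B (Python) =====
-- def snafu2int(snafu):
--     total = 0
--     for c in snafu:
--         total = total * 5 + (-2 if c == "=" else -1 if c == "-" else int(c))
--     return total
-- ===== Notes on version B (the rewrite author's own statement) =====
-- stated objective: idiomatic
-- what changed: B replaces A's reversed scan with a radix accumulator (total += digit*radix; radix *= 5) by a forward Horner pass (total = total*5 + digit), dropping the radix variable entirely.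
import Mathlib
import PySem

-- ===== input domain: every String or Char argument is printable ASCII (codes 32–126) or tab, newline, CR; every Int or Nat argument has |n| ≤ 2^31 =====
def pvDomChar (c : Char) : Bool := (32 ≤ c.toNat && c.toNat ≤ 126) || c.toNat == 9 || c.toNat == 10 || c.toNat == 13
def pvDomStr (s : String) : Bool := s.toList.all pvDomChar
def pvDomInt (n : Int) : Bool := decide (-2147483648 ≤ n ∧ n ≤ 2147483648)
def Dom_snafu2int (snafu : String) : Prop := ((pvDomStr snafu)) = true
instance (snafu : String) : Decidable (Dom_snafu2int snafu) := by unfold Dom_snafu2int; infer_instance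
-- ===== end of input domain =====

-- B replaces A's reversed scan with a radix accumulator by a forward Horner pass (no radix variable).

-- ===== PORT A =====
-- shared digit decode: -2 if c == "=" else -1 if c == "-" else int(c) (identical line in A and B)
def pvDigit (c : Char) : Int :=
  if c = '=' then -2 else if c = '-' then -1 else (PySem.Int.ofChars? [c]).getD 0

def snafu2int (snafu : String) : Int :=
  (snafu.toList.reverse.foldl
    (fun (st : Int × Int) c => (st.1 + pvDigit c * st.2, st.2 * 5)) (0, 1)).1

-- ===== PORT B =====
def snafu2int_alt (snafu : String) : Int :=
  snafu.toList.foldl (fun t c => t * 5 + pvDigit c) 0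

-- ===== PRECONDITION & SPEC =====
-- Pre_ excludes exactly the strings containing a character that is neither an equals sign,
-- a minus sign, nor an ASCII digit: on those, Python's int(c) raises ValueError in A.
def Pre_snafu2int (snafu : String) : Prop :=
  snafu.toList.all (fun c => c == '=' || c == '-' || c.isDigit) = true
instance (snafu : String) : Decidable (Pre_snafu2int snafu) := by unfold Pre_snafu2int; infer_instance
def pvWitness_snafu2int : String := "1=11-2"

def Spec_snafu2int (snafu : String) (out : Int) : Prop := out = snafu2int_alt snafu
instance (snafu : String) (out : Int) : Decidable (Spec_snafu2int snafu out) := by unfold Spec_snafu2int; infer_instance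

-- ===== CLAIM (what is proved, stated in full; the proofs are below) =====
def Claim_equal_snafu2int : Prop := ∀ (snafu : String), Dom_snafu2int snafu → Pre_snafu2int snafu → Spec_snafu2int snafu (snafu2int snafu)

-- ===== LEMMAS AND PROOFS =====
theorem pv_fold_eq (l : List Char) (t r : Int) :
    (l.foldl (fun (st : Int × Int) c => (st.1 + pvDigit c * st.2, st.2 * 5)) (t, r)).1
      = t + r * l.reverse.foldl (fun a c => a * 5 + pvDigit c) 0 := by
  induction l generalizing t r with
  | nil => simp
  | cons c l ih =>
      simp only [List.foldl_cons, List.reverse_cons, List.foldl_append, List.foldl_cons,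
        List.foldl_nil, ih]
      ring

-- ===== VERDICT (by name: the statement is the Claim_ definition above) =====
theorem snafu2int_spec : Claim_equal_snafu2int := by
  intro s _ _
  unfold Spec_snafu2int snafu2int snafu2int_alt
  rw [pv_fold_eq, List.reverse_reverse]
  ring
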